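-- pv_equiv track=rewrite | github.com/Xanarie/INTELLIHIRE | backend/app/ai/summarizer.py | _take_unique
-- ===== SOURCE A (Python) =====
-- from typing import Dict, List, Optional, Sequence
--
-- def _take_unique(items: Sequence[str], k: int) -> List[str]:
--     seen = set()
--     out = []
--     for it in items:
--         key = it.strip().lower()
--         if not key or key in seen:
--             continue
--         seen.add(key)
--         out.append(it.strip())
--         if len(out) >= k:
--             break
--     return out
-- ===== SOURCE B (Python) =====
-- def _take_unique(items, k):
--     if k <= 0:
--         return []
--     stripped = [it.strip() for it in items]
--     keys = [s.lower() for s in stripped]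
--     first = {key: i for i, key in reversed(list(enumerate(keys)))}
--     firsts = [s for i, (s, key) in enumerate(zip(stripped, keys))
--               if key and first[key] == i]
--     return firsts[:k]
-- ===== Notes on version B (the rewrite author's own statement) =====
-- stated objective: alternative
-- what changed: B replaces A's stateful seen-set loop with early exit by staged comprehensions: strip all items, lower them, precompute a first-occurrence-index dict over the keys, keep each entry whose key's first occurrence is its own position, then slice to k (returning [] outright for non-positive k).
-- intended difference: When k <= 0 and items contains an entry that is non-empty after stripping, A still returns that first entry (its length check fires only after appending) while B returns [], which is the intended meaning of taking at most k items. — e.g. on _take_unique(["x"], 0): A returns ["x"], B returns []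
import Mathlib
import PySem

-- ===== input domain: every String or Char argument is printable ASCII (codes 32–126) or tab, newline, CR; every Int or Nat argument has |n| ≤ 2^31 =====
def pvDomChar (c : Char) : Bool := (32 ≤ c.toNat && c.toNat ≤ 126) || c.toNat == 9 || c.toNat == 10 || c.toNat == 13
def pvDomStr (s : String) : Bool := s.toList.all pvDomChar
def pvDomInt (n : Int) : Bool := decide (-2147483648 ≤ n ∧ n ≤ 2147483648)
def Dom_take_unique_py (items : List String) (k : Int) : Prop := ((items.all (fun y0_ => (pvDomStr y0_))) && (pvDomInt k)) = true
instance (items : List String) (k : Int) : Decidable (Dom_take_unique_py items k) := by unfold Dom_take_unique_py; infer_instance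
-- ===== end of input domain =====

-- B rebuilds the result by staged comprehensions (strip, lower, keep first occurrences via a positional test) and a final slice, with [] for non-positive k; see D_ below for the k ≤ 0 corner.

-- ===== PORT A =====
-- A's loop with its `break` becomes structural recursion over items carrying (seen, out).
def take_unique_py_go (k : Int) : List String → PySem.Set String → List String → List String
  | [], _, out => out
  | it :: rest, seen, out =>
    let key := PySem.Str.lower (PySem.Str.strip it)
    if key = "" ∨ PySem.Set.contains seen key = true then
      take_unique_py_go k rest seen out
    else
      let seen' := PySem.Set.add seen key
      let out' := out ++ [PySem.Str.strip it]
      if k ≤ (out'.length : Int) then out'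
      else take_unique_py_go k rest seen' out'

def take_unique_py (items : List String) (k : Int) : List String :=
  take_unique_py_go k items PySem.Set.empty []

-- ===== PORT B =====
def take_unique_py_alt (items : List String) (k : Int) : List String :=
  if k ≤ 0 then []
  else
    let stripped := items.map PySem.Str.strip
    let keys := stripped.map PySem.Str.lower
    let first : PySem.Dict String Int := ((PySem.List.enumerate keys 0).reverse).foldl
      (fun d p => d.insert p.2 p.1) PySem.Dict.empty
    let firsts := (PySem.List.enumerate (stripped.zip keys) 0).filterMap
      (fun p => if p.2.2 ≠ "" ∧ PySem.Dict.get? first p.2.2 = some p.1 then some p.2.1 else none)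
    PySem.List.slice firsts none (some k)

-- ===== PRECONDITION & SPEC =====
-- When k ≤ 0 and some item is non-blank after stripping, A returns that first item (its length check fires only after appending) while B returns [], the intended value for taking at most k items.
def D_take_unique_py (items : List String) (k : Int) : Prop :=
  k ≤ 0 ∧ ∃ it ∈ items, PySem.Str.lower (PySem.Str.strip it) ≠ ""
instance (items : List String) (k : Int) : Decidable (D_take_unique_py items k) := by unfold D_take_unique_py; infer_instance

def Spec_take_unique_py (items : List String) (k : Int) (out : List String) : Prop := ¬ D_take_unique_py items k → out = take_unique_py_alt items k
instance (items : List String) (k : Int) (out : List String) : Decidable (Spec_take_unique_py items k out) := by unfold Spec_take_unique_py; infer_instance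

def pvDiffWitness_take_unique_py : List String × Int := (["x"], 0)
def pvDiffWitnessOut_take_unique_py : (List String) × (List String) := (["x"], [])

-- ===== CLAIM (what is proved, stated in full; the proofs are below) =====
def Claim_unchanged_take_unique_py : Prop := ∀ (items : List String) (k : Int), Dom_take_unique_py items k → Spec_take_unique_py items k (take_unique_py items k)
def Claim_changed_take_unique_py : Prop := Dom_take_unique_py (pvDiffWitness_take_unique_py.1) (pvDiffWitness_take_unique_py.2) ∧ D_take_unique_py (pvDiffWitness_take_unique_py.1) (pvDiffWitness_take_unique_py.2) ∧ take_unique_py (pvDiffWitness_take_unique_py.1) (pvDiffWitness_take_unique_py.2) = pvDiffWitnessOut_take_unique_py.1 ∧ take_unique_py_alt (pvDiffWitness_take_unique_py.1) (pvDiffWitness_take_unique_py.2) = pvDiffWitnessOut_take_unique_py.2 ∧ pvDiffWitnessOut_take_unique_py.1 ≠ pvDiffWitnessOut_take_unique_py.2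
def Claim_exact_take_unique_py : Prop := ∀ (items : List String) (k : Int), Dom_take_unique_py items k → D_take_unique_py items k → take_unique_py items k ≠ take_unique_py_alt items k

-- ===== LEMMAS AND PROOFS =====

-- Canonical "full dedup" list: the stripped values of the items whose (nonempty) key is new w.r.t. seen.
def pvCanon : List String → List String → List String
  | [], _ => []
  | it :: rest, seen =>
    let key := PySem.Str.lower (PySem.Str.strip it)
    if key = "" ∨ key ∈ seen then pvCanon rest seen
    else PySem.Str.strip it :: pvCanon rest (seen ++ [key])

-- B's keep-condition, recursively over the suffix, carrying ALL keys of the processed prefix.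
def pvBf : List String → List String → List String
  | [], _ => []
  | it :: rest, pk =>
    let key := PySem.Str.lower (PySem.Str.strip it)
    (if key ≠ "" ∧ key ∉ pk then [PySem.Str.strip it] else []) ++
      pvBf rest (pk ++ [key])

lemma pvSet_contains_iff (seen : List String) (x : String) :
    PySem.Set.contains seen x = true ↔ x ∈ seen := by
  simp [PySem.Set.contains]

-- A-side: the loop is "take (k - |out|) of the canonical list", while out is still short.
lemma pv_go_eq_canon (k : Int) (items : List String) :
    ∀ (seen out : List String), (out.length : Int) < k →
    take_unique_py_go k items seen out = out ++ (pvCanon items seen).take (k.toNat - out.length) := by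
  induction items with
  | nil => intro seen out h; simp [take_unique_py_go, pvCanon]
  | cons it rest ih =>
    intro seen out h
    simp only [take_unique_py_go, pvCanon]
    by_cases hskip : PySem.Str.lower (PySem.Str.strip it) = "" ∨
        PySem.Str.lower (PySem.Str.strip it) ∈ seen
    · have hskip' : PySem.Str.lower (PySem.Str.strip it) = "" ∨
          PySem.Set.contains seen (PySem.Str.lower (PySem.Str.strip it)) = true :=
        hskip.imp id (fun h1 => (pvSet_contains_iff _ _).mpr h1)
      rw [if_pos hskip', if_pos hskip]
      exact ih seen out h
    · rw [not_or] at hskip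
      have hAcond : ¬ (PySem.Str.lower (PySem.Str.strip it) = "" ∨
          PySem.Set.contains seen (PySem.Str.lower (PySem.Str.strip it)) = true) := by
        rw [not_or]
        exact ⟨hskip.1, by simp [hskip.2]⟩
      rw [if_neg hAcond, if_neg (not_or.mpr hskip)]
    -- the added key is fresh, so Set.add is append
      have hadd : PySem.Set.add seen (PySem.Str.lower (PySem.Str.strip it))
          = seen ++ [PySem.Str.lower (PySem.Str.strip it)] := by
        simp only [PySem.Set.add]
        rw [if_neg (by simp [hskip.2])]
      by_cases hk : k ≤ ((out ++ [PySem.Str.strip it]).length : Int)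
      · rw [if_pos hk]
        have : k.toNat - out.length = 1 := by
          simp only [List.length_append, List.length_cons, List.length_nil] at hk
          omega
        simp [this]
      · rw [if_neg hk, hadd]
        rw [ih _ (out ++ [PySem.Str.strip it])
          (by simp only [List.length_append, List.length_cons, List.length_nil] at hk ⊢; omega)]
        have : k.toNat - out.length = (k.toNat - (out ++ [PySem.Str.strip it]).length) + 1 := by
          simp only [List.length_append, List.length_cons, List.length_nil] at hk ⊢
          omega
        simp [this]

-- The two seen-states agree on nonempty keys, so the two dedup recursions agree.
lemma pv_canon_eq_bf (items : List String) :
    ∀ (seen pk : List String),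
    (∀ key : String, key ≠ "" → (key ∈ seen ↔ key ∈ pk)) →
    pvCanon items seen = pvBf items pk := by
  induction items with
  | nil => intro seen pk _; simp [pvCanon, pvBf]
  | cons it rest ih =>
    intro seen pk hinv
    simp only [pvCanon, pvBf]
    by_cases hz : PySem.Str.lower (PySem.Str.strip it) = ""
    · rw [if_pos (Or.inl hz), if_neg (by simp [hz])]
      simp only [List.nil_append]
      exact ih seen _ (fun key hk => by
        rw [hinv key hk]
        simp [List.mem_append]
        intro hek; exact absurd (hek ▸ hz) hk)
    · by_cases hs : PySem.Str.lower (PySem.Str.strip it) ∈ seen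
      · rw [if_pos (Or.inr hs), if_neg (by
          intro ⟨_, hnp⟩; exact hnp ((hinv _ hz).mp hs))]
        simp only [List.nil_append]
        exact ih seen _ (fun key hk => by
          rw [hinv key hk, List.mem_append]
          constructor
          · exact Or.inl
          · rintro (h | h)
            · exact h
            · simp at h; exact h ▸ (hinv _ hz).mp hs)
      · have hnp : PySem.Str.lower (PySem.Str.strip it) ∉ pk :=
          fun hp => hs ((hinv _ hz).mpr hp)
        rw [if_neg (by rw [not_or]; exact ⟨hz, hs⟩), if_pos ⟨hz, hnp⟩]
        simp only [List.singleton_append, List.cons.injEq, true_and]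
        exact ih _ _ (fun key hk => by
          simp only [List.mem_append, List.mem_singleton]
          rw [hinv key hk])

-- The first-occurrence dict: looking up any key gives the index of its first occurrence.
lemma pv_get_first (keys : List String) (s : Int) (key : String) :
    PySem.Dict.get? (((PySem.List.enumerate keys s).reverse).foldl
        (fun d p => d.insert p.2 p.1) PySem.Dict.empty) key
      = Option.map (fun n : Nat => s + (n : Int)) (PySem.List.index? keys key) := by
  rw [List.foldl_reverse]
  induction keys generalizing s with
  | nil => simp [PySem.List.enumerate_nil, PySem.List.index?_eq_idxOf?]
  | cons x rest ih =>
    rw [PySem.List.enumerate_cons]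
    simp only [List.foldr_cons]
    rw [PySem.Dict.get?_insert]
    by_cases hx : key = x
    · subst hx
      rw [if_pos rfl, PySem.List.index?_cons_self]
      simp
    · rw [if_neg hx, ih (s + 1),
        PySem.List.index?_cons_of_ne rest (fun h => hx h.symm)]
      cases h : PySem.List.index? rest key with
      | none => simp
      | some n => simp; ring

-- key ∉ pk exactly when the first occurrence of key in pk ++ key :: t is at position pk.length.
lemma pv_index_iff (pk t : List String) (key : String) :
    PySem.List.index? (pk ++ key :: t) key = some pk.length ↔ key ∉ pk := by
  constructor
  · intro h hmem
    rw [PySem.List.index?_append_of_mem _ hmem] at h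
    rcases (PySem.List.index?_eq_some_iff _ _ _).mp h with ⟨pre, suf, hpk, hlen, -⟩
    have heq := congrArg List.length hpk
    simp at heq
    omega
  · intro hmem
    exact (PySem.List.index?_eq_some_iff _ _ _).mpr ⟨pk, t, rfl, rfl, hmem⟩

-- B-side: the enumerate/zip/dict-lookup comprehension IS pvBf, for any processed prefix pk.
lemma pv_enum_eq_bf (suffix : List String) :
    ∀ (pk K : List String) (first : PySem.Dict String Int),
    K = pk ++ (suffix.map PySem.Str.strip).map PySem.Str.lower →
    (∀ key : String, PySem.Dict.get? first key
        = Option.map (fun n : Nat => (n : Int)) (PySem.List.index? K key)) →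
    (PySem.List.enumerate ((suffix.map PySem.Str.strip).zip
        ((suffix.map PySem.Str.strip).map PySem.Str.lower)) (pk.length : Int)).filterMap
      (fun p => if p.2.2 ≠ "" ∧ PySem.Dict.get? first p.2.2 = some p.1 then some p.2.1 else none)
      = pvBf suffix pk := by
  induction suffix with
  | nil => intro pk K first _ _; simp [pvBf, PySem.List.enumerate_nil]
  | cons it rest ih =>
    intro pk K first hK hfirst
    simp only [List.map_cons, List.zip_cons_cons, PySem.List.enumerate_cons,
      List.filterMap_cons, pvBf]
    have hcond : PySem.Dict.get? first (PySem.Str.lower (PySem.Str.strip it))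
          = some ((pk.length : Nat) : Int) ↔ PySem.Str.lower (PySem.Str.strip it) ∉ pk := by
      rw [hfirst, hK]
      simp only [List.map_cons]
      constructor
      · intro h hmem
        have h1 : PySem.List.index? (pk ++ PySem.Str.lower (PySem.Str.strip it) ::
            (rest.map PySem.Str.strip).map PySem.Str.lower)
            (PySem.Str.lower (PySem.Str.strip it)) = some pk.length := by
          rcases hx : PySem.List.index? (pk ++ PySem.Str.lower (PySem.Str.strip it) ::
              (rest.map PySem.Str.strip).map PySem.Str.lower)
              (PySem.Str.lower (PySem.Str.strip it)) with _ | n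
          · simp only [hx, Option.map_none] at h; exact absurd h (by simp)
          · simp only [hx, Option.map_some, Option.some.injEq] at h
            exact congrArg some (by exact_mod_cast h)
        exact (pv_index_iff _ _ _).mp h1 hmem
      · intro hmem
        rw [(pv_index_iff _ _ _).mpr hmem]
        simp
    have hrec : ((pk.length : Int) + 1)
        = (((pk ++ [PySem.Str.lower (PySem.Str.strip it)]).length : Nat) : Int) := by simp
    have hK' : K = (pk ++ [PySem.Str.lower (PySem.Str.strip it)]) ++
        (rest.map PySem.Str.strip).map PySem.Str.lower := by
      rw [hK]; simp
    by_cases hc : PySem.Str.lower (PySem.Str.strip it) ≠ "" ∧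
        PySem.Str.lower (PySem.Str.strip it) ∉ pk
    · rw [if_pos ⟨hc.1, hcond.mpr hc.2⟩, if_pos hc]
      simp only [List.singleton_append, List.cons.injEq, true_and]
      rw [hrec]
      exact ih _ K first hK' hfirst
    · rw [if_neg (fun hx => hc ⟨hx.1, hcond.mp hx.2⟩), if_neg hc]
      simp only [List.nil_append]
      rw [hrec]
      exact ih _ K first hK' hfirst

-- A's loop never appends when every key is empty.
lemma pv_go_all_blank (k : Int) (items : List String)
    (h : ∀ it ∈ items, PySem.Str.lower (PySem.Str.strip it) = "") :
    ∀ seen out, take_unique_py_go k items seen out = out := by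
  induction items with
  | nil => intro seen out; simp [take_unique_py_go]
  | cons it rest ih =>
    intro seen out
    simp only [take_unique_py_go]
    rw [if_pos (Or.inl (h it (by simp)))]
    exact ih (fun x hx => h x (by simp [hx])) seen out

-- Inside D_, A returns a nonempty list while B returns [].
lemma pv_go_ne_nil (k : Int) (hk : k ≤ 0) (items : List String)
    (h : ∃ it ∈ items, PySem.Str.lower (PySem.Str.strip it) ≠ "") :
    take_unique_py_go k items PySem.Set.empty [] ≠ [] := by
  induction items with
  | nil => simp at h
  | cons it rest ih =>
    simp only [take_unique_py_go]
    by_cases hz : PySem.Str.lower (PySem.Str.strip it) = ""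
    · rw [if_pos (Or.inl hz)]
      apply ih
      rcases h with ⟨w, hw, hwne⟩
      rcases List.mem_cons.mp hw with hweq | hwm
      · exact absurd (hweq ▸ hz) hwne
      · exact ⟨w, hwm, hwne⟩
    · rw [if_neg (by
        rw [not_or]
        exact ⟨hz, by simp [PySem.Set.contains, PySem.Set.empty]⟩)]
      rw [if_pos (by simp; omega)]
      simp

-- ===== VERDICT (by name: the statement is the Claim_ definition above) =====
theorem take_unique_py_spec : Claim_unchanged_take_unique_py := by
  intro items k _ hnd
  unfold D_take_unique_py at hnd
  unfold take_unique_py take_unique_py_alt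
  by_cases hk : k ≤ 0
  · rw [if_pos hk]
    have hall : ∀ it ∈ items, PySem.Str.lower (PySem.Str.strip it) = "" := by
      intro it hit
      by_contra hne
      exact hnd ⟨hk, it, hit, hne⟩
    exact pv_go_all_blank k items hall _ _
  · rw [if_neg hk]
    push Not at hk
    rw [pv_go_eq_canon k items PySem.Set.empty [] (by simpa using hk)]
    rw [PySem.List.slice_to _ (by omega : (0:Int) ≤ k)]
    rw [pv_canon_eq_bf items PySem.Set.empty [] (by
      intro key _; simp [PySem.Set.empty])]
    rw [← pv_enum_eq_bf items [] ((items.map PySem.Str.strip).map PySem.Str.lower)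
      (((PySem.List.enumerate ((items.map PySem.Str.strip).map PySem.Str.lower) 0).reverse).foldl
        (fun d p => d.insert p.2 p.1) PySem.Dict.empty)
      (by simp) (fun key => by simpa using pv_get_first _ 0 key)]
    simp

theorem take_unique_py_changed : Claim_changed_take_unique_py := by
  unfold Claim_changed_take_unique_py; decide

theorem take_unique_py_tight : Claim_exact_take_unique_py := by
  intro items k _ hd
  unfold D_take_unique_py at hd
  unfold take_unique_py take_unique_py_alt
  rw [if_pos hd.1]
  exact pv_go_ne_nil k hd.1 items hd.2
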